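-- pv_equiv track=rewrite | github.com/sneha5gsm/Data-Structures-and-Algorithms-Exercises | Practice Problems/gms_q2.py | solve
-- ===== SOURCE A (Python) =====
-- def solve(p, n):
--     total = 0
--     i = 0
--     n = n + 1
--     p.insert(0, 0)
--     sums1 = [0] * (n)
--     sums2 = [0] * (n)
--     sums1[0] = 0
--     sums2[n - 1] = 0
--     while i < (n - 1):
--         if (p[i] - p[i + 1]) > 0:
--             total = total + p[i] - p[i + 1]
--         else:
--             total = total + p[i + 1] - p[i]
--         sums1[i + 1] = total
--         i = i + 1
--     i = n - 1
--     total2 = 0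
--     while i > 0:
--         if (p[i] - p[i - 1]) > 0:
--             total2 = total2 + p[i] - p[i - 1]
--         else:
--             total2 = total2 + p[i - 1] - p[i]
--         sums2[i - 1] = total2
--         i = i - 1
--     # print sums1
--     # print sums2
--     i = 1
--     minimum = total
--     # print minimum
--     # print '===='
--     while i < (n - 1):
--         j = i + 1
--         while j < n:
--             tempsum = 0
--             x1 = 0
--             x2 = 0
--             y2 = 0
--             y1 = 0
--             if i > 0:
--                 if p[j] - p[i - 1] > 0:
--                     x1 = p[j] - p[i - 1]
--                 else:
--                     x1 = p[i - 1] - p[j]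
--                 x1 = x1 + sums1[i - 1]
--             if p[j] - p[i + 1] > 0:
--                 x2 = p[j] - p[i + 1]
--             else:
--                 x2 = p[i + 1] - p[j]
--             if p[i] - p[j - 1] > 0:
--                 y1 = p[i] - p[j - 1]
--             else:
--                 y1 = p[j - 1] - p[i]
--             if j < (n - 1):
--                 if p[i] - p[j + 1] > 0:
--                     y2 = p[i] - p[j + 1]
--                 else:
--                     y2 = p[j + 1] - p[i]
--                 y2 = y2 + sums2[j + 1]
--             if j == (i + 1):
--                 # print 'inside 8888'
--                 # print tempsum
--                 if p[i] - p[j] > 0: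
--                     tempsum = x1 + p[i] - p[j] + y2
--                 else:
--                     tempsum = x1 + p[j] - p[i] + y2
--                 # print tempsum
--             else:
--                 tempsum = sums1[j - 1] - sums1[i + 1] + x1 + x2 + y1 + y2
--             # print '----------'
--             # print i
--             # print j
--             # print x1
--             # print x2
--             # print y1
--             # print y2
--             # print tempsum
--             if tempsum < minimum:
--                 minimum = tempsum
--             j = j + 1
--         i = i + 1
--     return minimum
-- ===== SOURCE B (Python) =====
-- def solve(p, n):
--     # same observable mutation as A: a sentinel 0 is inserted at the front of p
--     p.insert(0, 0)
--     q = p[:n + 1]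
--
--     def cost(a):
--         return sum(abs(a[k] - a[k + 1]) for k in range(len(a) - 1))
--
--     best = cost(q)
--     for i in range(1, n):
--         for j in range(i + 1, n + 1):
--             q[i], q[j] = q[j], q[i]
--             best = min(best, cost(q))
--             q[i], q[j] = q[j], q[i]
--     return best
-- ===== Notes on version B (the rewrite author's own statement) =====
-- stated objective: simpler
-- what changed: Replaces A's prefix/suffix-sum arrays and local edge-patching case analysis by a direct brute force: for every swap pair recompute the full adjacent-absolute-difference cost of the swapped array and take the minimum.
import Mathlib
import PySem

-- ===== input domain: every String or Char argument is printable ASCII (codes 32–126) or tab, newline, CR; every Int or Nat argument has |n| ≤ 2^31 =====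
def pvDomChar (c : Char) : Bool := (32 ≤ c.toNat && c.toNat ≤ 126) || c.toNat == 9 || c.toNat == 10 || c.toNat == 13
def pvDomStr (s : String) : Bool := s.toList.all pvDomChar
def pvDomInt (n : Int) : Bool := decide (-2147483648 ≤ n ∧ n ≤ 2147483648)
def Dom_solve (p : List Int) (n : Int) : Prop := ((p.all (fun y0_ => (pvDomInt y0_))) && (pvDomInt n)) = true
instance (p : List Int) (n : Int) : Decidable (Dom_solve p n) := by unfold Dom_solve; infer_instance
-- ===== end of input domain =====

-- B replaces A's prefix/suffix-sum arrays and local edge-patching by a plain brute force that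
-- recomputes the full adjacent-absolute-difference cost for every swap (simpler, not faster);
-- both A and B mutate the Python p by inserting 0 at the front — the theorem is about the return value.


-- ===== PORT A =====
-- the first while loop of A (forward prefix costs); state = (total, sums1)
def stepFwd (p : List Int) (st : Int × List Int) (i : Nat) : Int × List Int :=
  let total := if p.getD i 0 - p.getD (i+1) 0 > 0
    then st.1 + p.getD i 0 - p.getD (i+1) 0
    else st.1 + p.getD (i+1) 0 - p.getD i 0
  (total, st.2.set (i+1) total)

-- the second while loop of A (backward suffix costs, i descending); state = (total2, sums2)
def stepBwd (p : List Int) (st : Int × List Int) (r : Nat) : Int × List Int :=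
  let i := r + 1
  let total2 := if p.getD i 0 - p.getD (i-1) 0 > 0
    then st.1 + p.getD i 0 - p.getD (i-1) 0
    else st.1 + p.getD (i-1) 0 - p.getD i 0
  (total2, st.2.set (i-1) total2)

-- body of A's innermost while loop (one candidate swap (i, j))
def bodyA (p sums1 sums2 : List Int) (m i : Nat) (minimum : Int) (j : Nat) : Int :=
  let x1 := if 0 < i then
      (if p.getD j 0 - p.getD (i-1) 0 > 0 then p.getD j 0 - p.getD (i-1) 0
       else p.getD (i-1) 0 - p.getD j 0) + sums1.getD (i-1) 0
    else 0
  let x2 := if p.getD j 0 - p.getD (i+1) 0 > 0 then p.getD j 0 - p.getD (i+1) 0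
    else p.getD (i+1) 0 - p.getD j 0
  let y1 := if p.getD i 0 - p.getD (j-1) 0 > 0 then p.getD i 0 - p.getD (j-1) 0
    else p.getD (j-1) 0 - p.getD i 0
  let y2 := if j < m - 1 then
      (if p.getD i 0 - p.getD (j+1) 0 > 0 then p.getD i 0 - p.getD (j+1) 0
       else p.getD (j+1) 0 - p.getD i 0) + sums2.getD (j+1) 0
    else 0
  let tempsum := if j = i + 1 then
      (if p.getD i 0 - p.getD j 0 > 0 then x1 + p.getD i 0 - p.getD j 0 + y2
       else x1 + p.getD j 0 - p.getD i 0 + y2)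
    else sums1.getD (j-1) 0 - sums1.getD (i+1) 0 + x1 + x2 + y1 + y2
  if tempsum < minimum then tempsum else minimum

def solve (p0 : List Int) (n0 : Int) : Int :=
  let n : Int := n0 + 1
  let p : List Int := 0 :: p0
  let m : Nat := n.toNat
  let sums1 : List Int := (List.replicate m (0:Int)).set 0 0
  let sums2 : List Int := (List.replicate m (0:Int)).set (m - 1) 0
  let fwd := (List.range (m - 1)).foldl (stepFwd p) (0, sums1)
  let total := fwd.1
  let sums1 := fwd.2
  let bwd := ((List.range (m - 1)).reverse).foldl (stepBwd p) (0, sums2)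
  let sums2 := bwd.2
  (List.range' 1 (m - 1 - 1)).foldl (fun minimum i =>
    (List.range' (i+1) (m - 1 - i)).foldl (bodyA p sums1 sums2 m i) minimum) total

-- ===== PORT B =====
-- Source B's cost(a): sum of |a[k] - a[k+1]| over consecutive indices
def pvCost (a : List Int) : Int :=
  ((List.range (a.length - 1)).map (fun k => |a.getD k 0 - a.getD (k+1) 0|)).sum

def solve_alt (p0 : List Int) (n : Int) : Int :=
  let p : List Int := 0 :: p0
  let q : List Int := PySem.List.slice p none (some (n+1))
  let best := pvCost q
  (List.range' 1 (n.toNat - 1)).foldl (fun best i =>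
    (List.range' (i+1) (n.toNat - i)).foldl (fun best j =>
      let q' := (q.set i (q.getD j 0)).set j (q.getD i 0)
      min best (pvCost q')) best) best

-- ===== PRECONDITION & SPEC =====
-- Pre_: after the insert A indexes p[0..n] and builds [0]*(n+1); it raises IndexError exactly
-- when n < 0 or n > len(p), so those inputs are excluded.
def Pre_solve (p : List Int) (n : Int) : Prop := 0 ≤ n ∧ n ≤ p.length
instance (p : List Int) (n : Int) : Decidable (Pre_solve p n) := by unfold Pre_solve; infer_instance
def pvWitness_solve : List Int × Int := ([5, 1, 3], 3)
def Spec_solve (p : List Int) (n : Int) (out : Int) : Prop := out = solve_alt p n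
instance (p : List Int) (n : Int) (out : Int) : Decidable (Spec_solve p n out) := by unfold Spec_solve; infer_instance

-- ===== CLAIM (what is proved, stated in full; the proofs are below) =====
def Claim_equal_solve : Prop := ∀ (p : List Int) (n : Int), Dom_solve p n → Pre_solve p n → Spec_solve p n (solve p n)

-- ===== LEMMAS AND PROOFS =====

-- edge weight t ↦ |a[t] - a[t+1]| and its prefix / interval sums
def eW (a : List Int) (t : Nat) : Int := |a.getD t 0 - a.getD (t+1) 0|
def sE (g : Nat → Int) (k : Nat) : Int := ((List.range k).map g).sum
def sR (g : Nat → Int) (s len : Nat) : Int := ((List.range' s len).map g).sum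

theorem sE_succ (g : Nat → Int) (k : Nat) : sE g (k+1) = sE g k + g k := by
  simp [sE, List.range_succ]
theorem sR_one (g : Nat → Int) (s : Nat) : sR g s 1 = g s := by simp [sR]
theorem sR_split (g : Nat → Int) (s m n : Nat) : sR g s (m+n) = sR g s m + sR g (s+m) n := by
  simp [sR, ← List.range'_append_1]
theorem sR_split' (g : Nat → Int) (s k1 k2 : Nat) (h : k1 ≤ k2) :
    sR g s k2 = sR g s k1 + sR g (s+k1) (k2-k1) := by
  have := sR_split g s k1 (k2-k1)
  rwa [Nat.add_sub_cancel' h] at this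
theorem sR_peel (g : Nat → Int) (s k : Nat) (h : 1 ≤ k) :
    sR g s k = g s + sR g (s+1) (k-1) := by
  have := sR_split' g s 1 k h
  rwa [sR_one] at this
theorem sE_eq_sR (g : Nat → Int) (k : Nat) : sE g k = sR g 0 k := by
  simp [sE, sR, List.range_eq_range']
theorem sR_eq_sE_sub (g : Nat → Int) (a b : Nat) (h : a ≤ b) :
    sR g a (b-a) = sE g b - sE g a := by
  have h2 := sR_split' g 0 a b h
  rw [← sE_eq_sR, ← sE_eq_sR, Nat.zero_add] at h2
  omega
theorem sR_congr (g f : Nat → Int) (s len : Nat) (h : ∀ t, s ≤ t → t < s + len → f t = g t) :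
    sR f s len = sR g s len := by
  unfold sR
  congr 1
  apply List.map_congr_left
  intro t ht
  rw [List.mem_range'_1] at ht
  exact h t ht.1 ht.2

-- getD facts used throughout
theorem getD_set_self (l : List Int) (i : Nat) (v : Int) (h : i < l.length) :
    (l.set i v).getD i 0 = v := by
  simp [List.getD_eq_getElem?_getD, h]
theorem getD_set_ne (l : List Int) (i t : Nat) (v : Int) (h : i ≠ t) :
    (l.set i v).getD t 0 = l.getD t 0 := by
  simp [List.getD_eq_getElem?_getD, List.getElem?_set_ne h]
theorem getD_take (l : List Int) (m t : Nat) (h : t < m) :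
    (l.take m).getD t 0 = l.getD t 0 := by
  simp [List.getD_eq_getElem?_getD, h]
theorem getD_replicate (n t : Nat) : (List.replicate n (0:Int)).getD t 0 = 0 := by
  simp [List.getD_eq_getElem?_getD, List.getElem?_replicate]
  split <;> rfl

-- abs via branch
theorem ifAbs (s x y : Int) : (if x - y > 0 then s + x - y else s + y - x) = s + |x - y| := by
  rcases abs_cases (x - y) with ⟨h1, h2⟩ | ⟨h1, h2⟩ <;> rw [h1] <;> split_ifs <;> omega
theorem ifAbs0 (x y : Int) : (if x - y > 0 then x - y else y - x) = |x - y| := by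
  rcases abs_cases (x - y) with ⟨h1, h2⟩ | ⟨h1, h2⟩ <;> rw [h1] <;> split_ifs <;> omega
theorem ifAbs3 (s u x y : Int) :
    (if x - y > 0 then s + x - y + u else s + y - x + u) = s + |x - y| + u := by
  rcases abs_cases (x - y) with ⟨h1, h2⟩ | ⟨h1, h2⟩ <;> rw [h1] <;> split_ifs <;> omega
theorem ifMin (m c : Int) : (if c < m then c else m) = min m c := by
  rw [min_def]; split_ifs <;> omega

-- invariant of A's forward loop
theorem fwd_inv (a : List Int) (N : Nat) : ∀ k, k ≤ N →
    ((List.range k).foldl (stepFwd a) (0, (List.replicate (N+1) (0:Int)).set 0 0)).1 = sE (eW a) k ∧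
    ((List.range k).foldl (stepFwd a) (0, (List.replicate (N+1) (0:Int)).set 0 0)).2.length = N+1 ∧
    ∀ t, ((List.range k).foldl (stepFwd a) (0, (List.replicate (N+1) (0:Int)).set 0 0)).2.getD t 0
      = if 1 ≤ t ∧ t ≤ k then sE (eW a) t else 0 := by
  intro k
  induction k with
  | zero =>
    intro _
    refine ⟨rfl, by simp, ?_⟩
    intro t
    rw [List.set_replicate_self]
    simp only [List.range_zero, List.foldl_nil, getD_replicate]
    rw [if_neg (by omega)]
  | succ k ih =>
    intro hk
    obtain ⟨h1, h2, h3⟩ := ih (by omega)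
    rw [List.range_succ, List.foldl_append, List.foldl_cons, List.foldl_nil]
    set st := (List.range k).foldl (stepFwd a) (0, (List.replicate (N+1) (0:Int)).set 0 0) with hst
    have hstep : stepFwd a st k = (sE (eW a) (k+1), st.2.set (k+1) (sE (eW a) (k+1))) := by
      simp only [stepFwd, h1]
      rw [ifAbs, sE_succ]
      rfl
    refine ⟨by rw [hstep], by rw [hstep]; simp [h2], ?_⟩
    intro t
    rw [hstep]
    by_cases hteq : k + 1 = t
    · subst hteq
      rw [getD_set_self _ _ _ (by rw [h2]; omega), if_pos (by omega)]
    · rw [getD_set_ne _ _ _ _ hteq, h3 t]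
      by_cases hc : 1 ≤ t ∧ t ≤ k
      · rw [if_pos hc, if_pos (by omega)]
      · rw [if_neg hc, if_neg (by omega)]

-- invariant of A's backward loop
theorem bwd_inv (a : List Int) (N : Nat) : ∀ k, k ≤ N →
    (((List.range' (N-k) k).reverse).foldl (stepBwd a) (0, (List.replicate (N+1) (0:Int)).set ((N+1)-1) 0)).1
      = sE (eW a) N - sE (eW a) (N-k) ∧
    (((List.range' (N-k) k).reverse).foldl (stepBwd a) (0, (List.replicate (N+1) (0:Int)).set ((N+1)-1) 0)).2.length = N+1 ∧
    ∀ t, (((List.range' (N-k) k).reverse).foldl (stepBwd a) (0, (List.replicate (N+1) (0:Int)).set ((N+1)-1) 0)).2.getD t 0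
      = if N-k ≤ t ∧ t < N then sE (eW a) N - sE (eW a) t else 0 := by
  intro k
  induction k with
  | zero =>
    intro _
    refine ⟨by simp, by simp, ?_⟩
    intro t
    simp only [Nat.add_sub_cancel]
    rw [List.set_replicate_self]
    simp only [List.range'_zero, List.reverse_nil, List.foldl_nil, getD_replicate]
    rw [if_neg (by omega)]
  | succ k ih =>
    intro hk
    obtain ⟨h1, h2, h3⟩ := ih (by omega)
    have hsplit : List.range' (N-(k+1)) (k+1) = List.range' (N-(k+1)) 1 ++ List.range' (N-k) k := by
      have h := List.range'_append_1 (s := N-(k+1)) (m := 1) (n := k)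
      rw [show N-(k+1)+1 = N-k from by omega, show 1+k = k+1 from by omega] at h
      exact h.symm
    rw [hsplit, List.reverse_append, List.foldl_append]
    simp only [List.range'_one, List.reverse_cons, List.reverse_nil, List.nil_append,
      List.foldl_cons, List.foldl_nil]
    set st := ((List.range' (N-k) k).reverse).foldl (stepBwd a) (0, (List.replicate (N+1) (0:Int)).set ((N+1)-1) 0) with hst
    have hval : sE (eW a) N - sE (eW a) (N-k) + |a.getD (N-(k+1)+1) 0 - a.getD (N-(k+1)) 0|
        = sE (eW a) N - sE (eW a) (N-(k+1)) := by
      rw [show N-k = N-(k+1)+1 from by omega, sE_succ, abs_sub_comm]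
      have he : |a.getD (N-(k+1)) 0 - a.getD (N-(k+1)+1) 0| = eW a (N-(k+1)) := rfl
      rw [he]
      ring
    have hstep : stepBwd a st (N-(k+1))
        = (sE (eW a) N - sE (eW a) (N-(k+1)),
           st.2.set (N-(k+1)) (sE (eW a) N - sE (eW a) (N-(k+1)))) := by
      simp only [stepBwd, h1, Nat.add_sub_cancel]
      rw [ifAbs, hval]
    refine ⟨by rw [hstep], by rw [hstep]; simp [h2], ?_⟩
    intro t
    rw [hstep]
    by_cases hteq : N-(k+1) = t
    · subst hteq
      rw [getD_set_self _ _ _ (by rw [h2]; omega), if_pos (by omega)]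
    · rw [getD_set_ne _ _ _ _ hteq, h3 t]
      by_cases hc : N-k ≤ t ∧ t < N
      · rw [if_pos hc, if_pos (by omega)]
      · rw [if_neg hc, if_neg (by omega)]

-- the cost of the unswapped prefix q = take (N+1) a
theorem cost_take (a : List Int) (N : Nat) (hlen : N + 1 ≤ a.length) :
    pvCost (a.take (N+1)) = sE (eW a) N := by
  unfold pvCost sE
  have hl : (a.take (N+1)).length = N+1 := by simp; omega
  rw [hl]
  simp only [Nat.add_sub_cancel]
  congr 1
  apply List.map_congr_left
  intro t ht
  rw [List.mem_range] at ht
  rw [getD_take _ _ _ (by omega), getD_take _ _ _ (by omega)]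
  rfl

-- sum of the swapped-edge weights, decomposed the way A's prefix/suffix sums see it
theorem sum_decomp (g f : Nat → Int) (N i j : Nat) (hi : 1 ≤ i) (hij : i < j) (hjN : j ≤ N)
    (hag : ∀ t, t < N → t ≠ i-1 → t ≠ i → t ≠ j-1 → t ≠ j → f t = g t) :
    sE f N = sE g (i-1) + f (i-1) + f i
      + (if i+1 < j then (sE g (j-1) - sE g (i+1)) + f (j-1) else 0)
      + (if j < N then f j + (sE g N - sE g (j+1)) else 0) := by
  have c0 : sR f 0 (i-1) = sE g (i-1) := by
    rw [sR_congr g f 0 (i-1) (fun t h1 h2 => hag t (by omega) (by omega) (by omega) (by omega) (by omega))]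
    rw [← sE_eq_sR]
  have p1 : sE f N = sR f 0 (i-1) + sR f (i-1) (N-(i-1)) := by
    have h := sR_split' f 0 (i-1) N (by omega)
    rw [Nat.zero_add] at h
    rw [sE_eq_sR]
    exact h
  have p2 : sR f (i-1) (N-(i-1)) = f (i-1) + sR f i (N-i) := by
    rw [sR_peel f (i-1) _ (by omega), show i-1+1 = i from by omega,
      show N-(i-1)-1 = N-i from by omega]
  have p3 : sR f i (N-i) = f i + sR f (i+1) (N-(i+1)) := by
    rw [sR_peel f i _ (by omega), show N-i-1 = N-(i+1) from by omega]
  by_cases hadj : i + 1 < j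
  · -- non-adjacent swap
    have c1 : sR f (i+1) (j-1-(i+1)) = sE g (j-1) - sE g (i+1) := by
      rw [sR_congr g f _ _ (fun t h1 h2 => hag t (by omega) (by omega) (by omega) (by omega) (by omega))]
      exact sR_eq_sE_sub g (i+1) (j-1) (by omega)
    have p4 : sR f (i+1) (N-(i+1)) = sR f (i+1) (j-1-(i+1)) + sR f (j-1) (N-(j-1)) := by
      have h := sR_split' f (i+1) (j-1-(i+1)) (N-(i+1)) (by omega)
      rw [show (i+1) + (j-1-(i+1)) = j-1 from by omega,
        show N-(i+1) - (j-1-(i+1)) = N-(j-1) from by omega] at h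
      exact h
    have p5 : sR f (j-1) (N-(j-1)) = f (j-1) + sR f j (N-j) := by
      rw [sR_peel f (j-1) _ (by omega), show j-1+1 = j from by omega,
        show N-(j-1)-1 = N-j from by omega]
    by_cases hjlt : j < N
    · have c2 : sR f (j+1) (N-(j+1)) = sE g N - sE g (j+1) := by
        rw [sR_congr g f _ _ (fun t h1 h2 => hag t (by omega) (by omega) (by omega) (by omega) (by omega))]
        exact sR_eq_sE_sub g (j+1) N (by omega)
      have p6 : sR f j (N-j) = f j + sR f (j+1) (N-(j+1)) := by
        rw [sR_peel f j _ (by omega), show N-j-1 = N-(j+1) from by omega]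
      rw [p1, p2, p3, p4, p5, p6, c0, c1, c2, if_pos hadj, if_pos hjlt]
      ring
    · have p6 : sR f j (N-j) = 0 := by
        rw [show N-j = 0 from by omega]
        simp [sR]
      rw [p1, p2, p3, p4, p5, p6, c0, c1, if_pos hadj, if_neg hjlt]
      ring
  · -- adjacent swap: j = i+1
    have hadj' : j = i + 1 := by omega
    subst hadj'
    by_cases hjlt : i + 1 < N
    · have c2 : sR f (i+1+1) (N-(i+1+1)) = sE g N - sE g (i+1+1) := by
        rw [sR_congr g f _ _ (fun t h1 h2 => hag t (by omega) (by omega) (by omega) (by omega) (by omega))]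
        exact sR_eq_sE_sub g (i+1+1) N (by omega)
      have p6 : sR f (i+1) (N-(i+1)) = f (i+1) + sR f (i+1+1) (N-(i+1+1)) := by
        rw [sR_peel f (i+1) _ (by omega), show N-(i+1)-1 = N-(i+1+1) from by omega]
      rw [p1, p2, p3, p6, c0, c2, if_neg hadj, if_pos hjlt]
      ring
    · have p6 : sR f (i+1) (N-(i+1)) = 0 := by
        rw [show N-(i+1) = 0 from by omega]
        simp [sR]
      rw [p1, p2, p3, p6, c0, if_neg hadj, if_neg hjlt]
      ring

-- value of the swapped list at index t
theorem getD_swap (a : List Int) (M i j t : Nat) (hM : M ≤ a.length)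
    (hi : i < M) (hj : j < M) (ht : t < M) (hij : i ≠ j) :
    (((a.take M).set i ((a.take M).getD j 0)).set j ((a.take M).getD i 0)).getD t 0
      = if t = j then a.getD i 0 else if t = i then a.getD j 0 else a.getD t 0 := by
  have hlq : (a.take M).length = M := by simp; omega
  by_cases htj : t = j
  · subst htj
    rw [getD_set_self _ _ _ (by simp [hlq]; omega), getD_take _ _ _ hi, if_pos rfl]
  · rw [getD_set_ne _ _ _ _ (fun h => htj h.symm), if_neg htj]
    by_cases hti : t = i
    · subst hti
      rw [getD_set_self _ _ _ (by omega), getD_take _ _ _ hj, if_pos rfl]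
    · rw [getD_set_ne _ _ _ _ (fun h => hti h.symm), if_neg hti, getD_take _ _ _ ht]

-- per-pair agreement: A's tempsum/min update equals B's full recompute of the swapped cost
theorem body_eq (p0 : List Int) (N i j : Nat) (s1 s2 : List Int) (minimum : Int)
    (hlen : N ≤ p0.length) (hi : 1 ≤ i) (hij : i < j) (hjN : j ≤ N)
    (hs1 : ∀ t, t ≤ N → s1.getD t 0 = sE (eW (0 :: p0)) t)
    (hs2 : ∀ t, t ≤ N → s2.getD t 0 = sE (eW (0 :: p0)) N - sE (eW (0 :: p0)) t) :
    bodyA (0 :: p0) s1 s2 (N+1) i minimum j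
      = min minimum (pvCost (((((0::p0).take (N+1)).set i (((0::p0).take (N+1)).getD j 0)).set j
          (((0::p0).take (N+1)).getD i 0)))) := by
  have halen : N + 1 ≤ (0 :: p0).length := by simp; omega
  set a := 0 :: p0 with ha
  set q := a.take (N+1) with hq
  set g := eW a with hg
  set w : Nat → Int := fun t => if t = j then a.getD i 0 else if t = i then a.getD j 0 else a.getD t 0 with hw
  set f : Nat → Int := fun t => |w t - w (t+1)| with hf
  have hcost : pvCost ((q.set i (q.getD j 0)).set j (q.getD i 0)) = sE f N := by
    unfold pvCost sE
    have hlq2 : ((q.set i (q.getD j 0)).set j (q.getD i 0)).length = N + 1 := by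
      simp [hq]; omega
    rw [hlq2]
    simp only [Nat.add_sub_cancel]
    congr 1
    apply List.map_congr_left
    intro t ht
    rw [List.mem_range] at ht
    rw [hq, getD_swap a (N+1) i j t halen (by omega) (by omega) (by omega) (by omega),
        getD_swap a (N+1) i j (t+1) halen (by omega) (by omega) (by omega) (by omega)]
  have hagree : ∀ t, t < N → t ≠ i-1 → t ≠ i → t ≠ j-1 → t ≠ j → f t = g t := by
    intro t h1 h2 h3 h4 h5
    simp only [hf, hw, hg]
    split_ifs <;> first | rfl | omega
  have hdec := sum_decomp g f N i j hi hij hjN hagree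
  have hfim : f (i-1) = |a.getD (i-1) 0 - a.getD j 0| := by
    simp only [hf, hw, show i-1+1 = i from by omega]
    split_ifs <;> first | rfl | omega
  rw [hcost]
  simp only [bodyA, Nat.add_sub_cancel]
  rw [if_pos (show 0 < i from by omega)]
  simp only [ifAbs0, ifAbs3]
  rw [hs1 (i-1) (by omega), hs1 (j-1) (by omega), hs1 (i+1) (by omega)]
  by_cases hjlt : j < N
  · rw [if_pos hjlt, hs2 (j+1) (by omega)]
    have hfj : f j = |a.getD i 0 - a.getD (j+1) 0| := by
      simp only [hf, hw]
      split_ifs <;> first | rfl | omega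
    by_cases hadj : j = i + 1
    · rw [if_pos hadj, ifMin]
      apply congrArg
      rw [hdec, if_neg (show ¬ (i+1 < j) from by omega), if_pos hjlt]
      have hfi : f i = |a.getD j 0 - a.getD i 0| := by
        simp only [hf, hw]
        split_ifs <;> first | rfl | omega
      rw [hfim, hfi, hfj, abs_sub_comm (a.getD (i-1) 0) (a.getD j 0),
        abs_sub_comm (a.getD j 0) (a.getD i 0)]
      ring
    · rw [if_neg hadj, ifMin]
      apply congrArg
      rw [hdec, if_pos (show i+1 < j from by omega), if_pos hjlt]
      have hfi : f i = |a.getD j 0 - a.getD (i+1) 0| := by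
        simp only [hf, hw]
        split_ifs <;> first | rfl | omega
      have hfjm : f (j-1) = |a.getD (j-1) 0 - a.getD i 0| := by
        simp only [hf, hw, show j-1+1 = j from by omega]
        split_ifs <;> first | rfl | omega
      rw [hfim, hfi, hfjm, hfj, abs_sub_comm (a.getD (i-1) 0) (a.getD j 0),
        abs_sub_comm (a.getD (j-1) 0) (a.getD i 0)]
      ring
  · rw [if_neg hjlt]
    by_cases hadj : j = i + 1
    · rw [if_pos hadj, ifMin]
      apply congrArg
      rw [hdec, if_neg (show ¬ (i+1 < j) from by omega), if_neg hjlt]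
      have hfi : f i = |a.getD j 0 - a.getD i 0| := by
        simp only [hf, hw]
        split_ifs <;> first | rfl | omega
      rw [hfim, hfi, abs_sub_comm (a.getD (i-1) 0) (a.getD j 0),
        abs_sub_comm (a.getD j 0) (a.getD i 0)]
      ring
    · rw [if_neg hadj, ifMin]
      apply congrArg
      rw [hdec, if_pos (show i+1 < j from by omega), if_neg hjlt]
      have hfi : f i = |a.getD j 0 - a.getD (i+1) 0| := by
        simp only [hf, hw]
        split_ifs <;> first | rfl | omega
      have hfjm : f (j-1) = |a.getD (j-1) 0 - a.getD i 0| := by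
        simp only [hf, hw, show j-1+1 = j from by omega]
        split_ifs <;> first | rfl | omega
      rw [hfim, hfi, hfjm, abs_sub_comm (a.getD (i-1) 0) (a.getD j 0),
        abs_sub_comm (a.getD (j-1) 0) (a.getD i 0)]
      ring

-- ===== VERDICT (by name: the statement is the Claim_ definition above) =====
theorem solve_spec : Claim_equal_solve := by
  unfold Claim_equal_solve Spec_solve Pre_solve
  intro p n _ hpre
  obtain ⟨hn0, hnlen⟩ := hpre
  set N := n.toNat with hN
  have hn : n = (N : Int) := by omega
  have hlen : N ≤ p.length := by omega
  rw [hn]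
  simp only [solve, solve_alt]
  have hm : (((N:Int)) + 1).toNat = N + 1 := by omega
  have hsl : PySem.List.slice (0 :: p) none (some ((N:Int) + 1)) = (0 :: p).take (N+1) := by
    have h := PySem.List.slice_to_natCast (xs := 0 :: p) (b := N+1)
    rwa [Nat.cast_add, Nat.cast_one] at h
  rw [hm, hsl]
  simp only [Int.toNat_natCast, Nat.add_sub_cancel]
  obtain ⟨hT, hL1, hG1⟩ := fwd_inv (0 :: p) N N le_rfl
  obtain ⟨hT2, hL2, hG2⟩ := bwd_inv (0 :: p) N N le_rfl
  simp only [Nat.sub_self] at hT2 hL2 hG2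
  rw [List.range_eq_range'] at hT hL1 hG1 ⊢
  have hs1 : ∀ t, t ≤ N →
      ((List.range' 0 N).foldl (stepFwd (0 :: p)) (0, (List.replicate (N+1) (0:Int)).set 0 0)).2.getD t 0
        = sE (eW (0 :: p)) t := by
    intro t ht
    rw [hG1 t]
    by_cases h1t : 1 ≤ t
    · rw [if_pos ⟨h1t, ht⟩]
    · rw [if_neg (by omega), show t = 0 from by omega]
      rfl
  have hs2 : ∀ t, t ≤ N →
      (((List.range' 0 N).reverse).foldl (stepBwd (0 :: p)) (0, (List.replicate (N+1) (0:Int)).set ((N+1)-1) 0)).2.getD t 0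
        = sE (eW (0 :: p)) N - sE (eW (0 :: p)) t := by
    intro t ht
    rw [hG2 t]
    by_cases htN : t < N
    · rw [if_pos ⟨by omega, htN⟩]
    · rw [if_neg (by omega), show t = N from by omega]
      omega
  rw [hT, cost_take (0 :: p) N (by simp; omega)]
  apply PySem.List.foldl_congr_mem
  intro acc i hmi
  rw [List.mem_range'_1] at hmi
  apply PySem.List.foldl_congr_mem
  intro acc2 j hmj
  rw [List.mem_range'_1] at hmj
  exact body_eq p N i j _ _ acc2 hlen (by omega) (by omega) (by omega) hs1 hs2
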